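-- pv_equiv track=rewrite | github.com/idnbso/advent-of-code-2022 | day08/treetop_tree_house.py | get_max_heights_maps
-- ===== SOURCE A (Python) =====
-- def get_max_heights_maps(heights_map):
--     total_rows = len(heights_map)
--     total_cols = len(heights_map[0])
--     max_top_heights_map = [[heights_map[row][col] for col in range(total_cols)] for row in range(total_rows)]
--     max_bottom_heights_map = [[heights_map[row][col] for col in range(total_cols)] for row in range(total_rows)]
--     max_left_heights_map = [[heights_map[row][col] for col in range(total_cols)] for row in range(total_rows)]
--     max_right_heights_map = [[heights_map[row][col] for col in range(total_cols)] for row in range(total_rows)]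
--
--     for row in range(1, total_rows - 1):
--         for col in range(1, total_cols - 1):
--             top_cell = max_top_heights_map[row - 1][col]
--             cell = max_top_heights_map[row][col]
--             max_top_heights_map[row][col] = max(cell, top_cell)
--
--     for row in range(total_rows - 2, 0, -1):
--         for col in range(1, total_cols - 1):
--             bottom_cell = max_bottom_heights_map[row + 1][col]
--             cell = max_bottom_heights_map[row][col]
--             max_bottom_heights_map[row][col] = max(cell, bottom_cell)
--
--     for row in range(1, total_rows - 1):
--         for col in range(1, total_cols - 1):
--             left_cell = max_left_heights_map[row][col - 1]
--             cell = max_left_heights_map[row][col]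
--             max_left_heights_map[row][col] = max(cell, left_cell)
--
--     for row in range(1, total_rows - 1):
--         for col in range(total_cols - 2, 0, -1):
--             right_cell = max_right_heights_map[row][col + 1]
--             cell = max_right_heights_map[row][col]
--             max_right_heights_map[row][col] = max(cell, right_cell)
--
--     return (
--         max_top_heights_map,
--         max_bottom_heights_map,
--         max_left_heights_map,
--         max_right_heights_map
--     )
-- ===== SOURCE B (Python) =====
-- def get_max_heights_maps(heights_map):
--     rows = len(heights_map)
--     cols = len(heights_map[0])
--     grid = [row[:cols] for row in heights_map]
--     columns = [[grid[r][c] for r in range(rows)] for c in range(cols)]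
--
--     def build(value_at):
--         return [[value_at(r, c)
--                  if 0 < r < rows - 1 and 0 < c < cols - 1
--                  else grid[r][c]
--                  for c in range(cols)] for r in range(rows)]
--
--     top = build(lambda r, c: max(columns[c][:r + 1]))
--     bottom = build(lambda r, c: max(columns[c][r:]))
--     left = build(lambda r, c: max(grid[r][:c + 1]))
--     right = build(lambda r, c: max(grid[r][c:]))
--     return (top, bottom, left, right)
-- ===== Notes on version B (the rewrite author's own statement) =====
-- stated objective: simpler
-- what changed: Replaces A's four in-place dynamic-programming sweeps (each cell updated from the neighbouring already-updated cell in a fixed traversal order) with a direct per-cell rule: every interior cell is max() over the slice of original input values from that cell to the border (row slices plus a transposed column list built once), with no DP tables, no accumulators and no update order.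
import Mathlib
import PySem

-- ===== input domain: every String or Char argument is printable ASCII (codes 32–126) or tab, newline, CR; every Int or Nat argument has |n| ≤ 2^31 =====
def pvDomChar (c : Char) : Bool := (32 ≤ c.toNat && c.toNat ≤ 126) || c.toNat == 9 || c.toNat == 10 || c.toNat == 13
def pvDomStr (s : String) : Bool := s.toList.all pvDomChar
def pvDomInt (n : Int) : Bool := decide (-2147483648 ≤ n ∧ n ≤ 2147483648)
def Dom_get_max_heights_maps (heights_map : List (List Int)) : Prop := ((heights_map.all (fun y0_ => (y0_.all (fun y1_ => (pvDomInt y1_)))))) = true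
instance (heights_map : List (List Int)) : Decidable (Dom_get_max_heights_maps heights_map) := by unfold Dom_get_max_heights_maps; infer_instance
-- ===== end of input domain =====

-- B replaces A's four in-place DP sweeps (each reading back already-updated neighbour
-- cells in a fixed order) by a direct per-cell rule: every interior cell is max() over
-- the slice of ORIGINAL input values from that cell to the border (row slices, plus a
-- transposed column list built once), borders kept as the input (objective: simpler —
-- no DP tables, no accumulators, no update order; B pays O(R*C*(R+C)) for it). Neither implementation mutates its argument; A raises
-- IndexError on inputs excluded by Pre_ below.

-- ===== PORT A =====
-- m[r][c] read / m[r][c] = v write on the copied rectangular grids; all indices that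
-- the Python loops produce are ≥ 0 and in range, so Nat indexing with getD is exact there.
def pvCell (m : List (List Int)) (r c : Nat) : Int := (m.getD r []).getD c 0
def pvSet2 (m : List (List Int)) (r c : Nat) (v : Int) : List (List Int) :=
  m.set r ((m.getD r []).set c v)
-- [[g[row][col] for col in range(C)] for row in range(R)]
def pvCopy (g : List (List Int)) (R C : Nat) : List (List Int) :=
  (List.range R).map (fun r => (List.range C).map (fun c => pvCell g r c))

-- Python's range(1, n-1) = List.range' 1 (n-2); range(n-2, 0, -1) = (List.range' 1 (n-2)).reverse
-- (Nat subtraction matches Python's empty ranges for n ≤ 2).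
def get_max_heights_maps (heights_map : List (List Int)) : List (List Int) × List (List Int) × List (List Int) × List (List Int) :=
  let totalRows := heights_map.length
  let totalCols := (heights_map.getD 0 []).length   -- len(heights_map[0]); [] excluded by Pre_
  let maxTop0 := pvCopy heights_map totalRows totalCols
  let maxBottom0 := pvCopy heights_map totalRows totalCols
  let maxLeft0 := pvCopy heights_map totalRows totalCols
  let maxRight0 := pvCopy heights_map totalRows totalCols
  let maxTop := (List.range' 1 (totalRows - 2)).foldl (fun M row =>
      (List.range' 1 (totalCols - 2)).foldl (fun M col =>
        pvSet2 M row col (max (pvCell M row col) (pvCell M (row - 1) col))) M) maxTop0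
  let maxBottom := ((List.range' 1 (totalRows - 2)).reverse).foldl (fun M row =>
      (List.range' 1 (totalCols - 2)).foldl (fun M col =>
        pvSet2 M row col (max (pvCell M row col) (pvCell M (row + 1) col))) M) maxBottom0
  let maxLeft := (List.range' 1 (totalRows - 2)).foldl (fun M row =>
      (List.range' 1 (totalCols - 2)).foldl (fun M col =>
        pvSet2 M row col (max (pvCell M row col) (pvCell M row (col - 1)))) M) maxLeft0
  let maxRight := (List.range' 1 (totalRows - 2)).foldl (fun M row =>
      ((List.range' 1 (totalCols - 2)).reverse).foldl (fun M col =>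
        pvSet2 M row col (max (pvCell M row col) (pvCell M row (col + 1)))) M) maxRight0
  (maxTop, maxBottom, maxLeft, maxRight)

-- ===== PORT B =====
-- Python's max(list) on the nonempty slices Source B builds; [] is unreachable there
-- (every slice contains at least the cell's own entry), so the 0 default is never used.
def pvMaxNE : List Int → Int
  | [] => 0
  | x :: xs => xs.foldl max x

-- row[:cols] / columns[c][:r+1] / columns[c][r:] with 0 ≤ bounds: take/drop are exact here.
def get_max_heights_maps_alt (heights_map : List (List Int)) : List (List Int) × List (List Int) × List (List Int) × List (List Int) :=
  let rows := heights_map.length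
  let cols := (heights_map.getD 0 []).length
  let grid := heights_map.map (fun row => row.take cols)
  let columns := (List.range cols).map (fun c => (List.range rows).map (fun r => pvCell grid r c))
  let build : (Nat → Nat → Int) → List (List Int) := fun valueAt =>
    (List.range rows).map (fun r => (List.range cols).map (fun c =>
      if 0 < r ∧ r < rows - 1 ∧ 0 < c ∧ c < cols - 1 then valueAt r c
      else pvCell grid r c))
  (build (fun r c => pvMaxNE ((columns.getD c []).take (r + 1))),
   build (fun r c => pvMaxNE ((columns.getD c []).drop r)),
   build (fun r c => pvMaxNE ((grid.getD r []).take (c + 1))),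
   build (fun r c => pvMaxNE ((grid.getD r []).drop c)))

-- ===== PRECONDITION & SPEC =====
-- Pre_ excludes exactly the inputs on which the Python A raises IndexError: the empty
-- grid (heights_map[0]) and grids where some row is shorter than the first row
-- (heights_map[row][col] inside the copy comprehensions).
def Pre_get_max_heights_maps (heights_map : List (List Int)) : Prop :=
  heights_map ≠ [] ∧ ∀ row ∈ heights_map, (heights_map.getD 0 []).length ≤ row.length
instance (heights_map : List (List Int)) : Decidable (Pre_get_max_heights_maps heights_map) := by
  unfold Pre_get_max_heights_maps; infer_instance
def pvWitness_get_max_heights_maps : List (List Int) := [[3, 0, 3], [2, 5, 1], [0, 4, 2]]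
def Spec_get_max_heights_maps (heights_map : List (List Int)) (out : List (List Int) × List (List Int) × List (List Int) × List (List Int)) : Prop := out = get_max_heights_maps_alt heights_map
instance (heights_map : List (List Int)) (out : List (List Int) × List (List Int) × List (List Int) × List (List Int)) : Decidable (Spec_get_max_heights_maps heights_map out) := by unfold Spec_get_max_heights_maps; infer_instance

-- ===== CLAIM (what is proved, stated in full; the proofs are below) =====
def Claim_equal_get_max_heights_maps : Prop := ∀ (heights_map : List (List Int)), Dom_get_max_heights_maps heights_map → Pre_get_max_heights_maps heights_map → Spec_get_max_heights_maps heights_map (get_max_heights_maps heights_map)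

-- ===== LEMMAS AND PROOFS =====
def pvUpd (v : Nat → Nat → Int) (r c : Nat) (t : Int) : Nat → Nat → Int :=
  fun r' c' => if r' = r ∧ c' = c then t else v r' c'

def pvShape (m : List (List Int)) (R C : Nat) : Prop :=
  m.length = R ∧ ∀ row ∈ m, row.length = C

def pvMax1 (H : Nat → Int) : Nat → Int
  | 0 => H 0
  | r + 1 => max (pvMax1 H r) (H (r + 1))

def pvMax1R (H : Nat → Int) (K c : Nat) : Int := pvMax1 (fun j => H (K - j)) (K - c)

lemma pvMax1_congr (H H' : Nat → Int) : ∀ r, (∀ i, i ≤ r → H i = H' i) → pvMax1 H r = pvMax1 H' r := by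
  intro r
  induction r with
  | zero => intro h; simpa [pvMax1] using h 0 le_rfl
  | succ r ih =>
      intro h
      simp only [pvMax1]
      rw [ih (fun i hi => h i (by omega)), h (r + 1) le_rfl]

lemma pvMax1_succ_comm (H : Nat → Int) (r : Nat) :
    max (H (r + 1)) (pvMax1 H r) = pvMax1 H (r + 1) := by
  simp only [pvMax1]; rw [max_comm]

lemma pvMax1R_step (H : Nat → Int) (K c : Nat) (hc : c < K) :
    pvMax1R H K c = max (H c) (pvMax1R H K (c + 1)) := by
  obtain ⟨k, hk⟩ : ∃ k, K - c = k + 1 := ⟨K - c - 1, by omega⟩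
  have h1 : K - (c + 1) = k := by omega
  have h2 : K - (k + 1) = c := by omega
  unfold pvMax1R
  rw [hk, h1]
  show max (pvMax1 _ k) (H (K - (k + 1))) = _
  rw [h2, max_comm]

lemma pvMax1R_top (H : Nat → Int) (K : Nat) : pvMax1R H K K = H K := by
  unfold pvMax1R
  rw [Nat.sub_self]
  show H (K - 0) = H K
  rw [Nat.sub_zero]

lemma pvShape_mk (f : Nat → Nat → Int) (R C : Nat) :
    pvShape ((List.range R).map (fun r => (List.range C).map (fun c => f r c))) R C := by
  constructor
  · simp
  · intro row hrow
    simp only [List.mem_map, List.mem_range] at hrow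
    obtain ⟨r, _, hr⟩ := hrow
    simp [← hr]

lemma pvCell_mk (f : Nat → Nat → Int) (R C r c : Nat) (hr : r < R) (hc : c < C) :
    pvCell ((List.range R).map (fun r => (List.range C).map (fun c => f r c))) r c = f r c := by
  unfold pvCell
  simp only [List.getD_eq_getElem?_getD, List.getElem?_map, List.getElem?_range hr,
    List.getElem?_range hc, Option.map_some, Option.getD_some]

lemma pvCell_set2 (m : List (List Int)) (R C r c : Nat) (v : Int)
    (h : pvShape m R C) (hr : r < R) (hc : c < C) :
    pvCell (pvSet2 m r c v) = pvUpd (pvCell m) r c v := by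
  obtain ⟨hlen, hrow⟩ := h
  have hrm : r < m.length := by omega
  have hrowlen : (m.getD r []).length = C := by
    rw [List.getD_eq_getElem _ _ hrm]
    exact hrow _ (List.getElem_mem hrm)
  have hcl : c < (m.getD r []).length := by omega
  funext r' c'
  unfold pvSet2 pvCell pvUpd
  by_cases h1 : r' = r
  · subst h1
    rw [show (m.set r' ((m.getD r' []).set c v)).getD r' [] = (m.getD r' []).set c v by
        rw [List.getD_eq_getElem?_getD, List.getElem?_set_self hrm, Option.getD_some]]
    by_cases h2 : c' = c
    · subst h2
      rw [show ((m.getD r' []).set c' v).getD c' 0 = v by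
          rw [List.getD_eq_getElem?_getD, List.getElem?_set_self hcl, Option.getD_some]]
      simp
    · rw [show ((m.getD r' []).set c v).getD c' 0 = (m.getD r' []).getD c' 0 by
          rw [List.getD_eq_getElem?_getD, List.getElem?_set_ne (fun h => h2 h.symm),
            ← List.getD_eq_getElem?_getD]]
      simp [h2]
  · rw [show (m.set r ((m.getD r []).set c v)).getD r' [] = m.getD r' [] by
        rw [List.getD_eq_getElem?_getD, List.getElem?_set_ne (fun h => h1 h.symm),
          ← List.getD_eq_getElem?_getD]]
    simp [h1]

lemma pvShape_set2 (m : List (List Int)) (R C r c : Nat) (v : Int)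
    (h : pvShape m R C) (hr : r < R) :
    pvShape (pvSet2 m r c v) R C := by
  obtain ⟨hlen, hrow⟩ := h
  have hrm : r < m.length := by omega
  constructor
  · simp [pvSet2, hlen]
  · intro row hmem
    rcases List.mem_or_eq_of_mem_set hmem with hmem | hmem
    · exact hrow _ hmem
    · rw [hmem, List.length_set, List.getD_eq_getElem _ _ hrm]
      exact hrow _ (List.getElem_mem hrm)

lemma pvFoldl_sim {α : Type} (R C : Nat) (stepM : List (List Int) → α → List (List Int))
    (stepF : (Nat → Nat → Int) → α → (Nat → Nat → Int)) :
    ∀ (l : List α) (m : List (List Int)),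
      (∀ m' x, x ∈ l → pvShape m' R C →
        pvShape (stepM m' x) R C ∧ pvCell (stepM m' x) = stepF (pvCell m') x) →
      pvShape m R C →
      pvShape (l.foldl stepM m) R C ∧ pvCell (l.foldl stepM m) = l.foldl stepF (pvCell m) := by
  intro l
  induction l with
  | nil => intro m _ hm; exact ⟨hm, rfl⟩
  | cons x l ih =>
      intro m h hm
      obtain ⟨h1, h2⟩ := h m x List.mem_cons_self hm
      obtain ⟨h3, h4⟩ := ih (stepM m x) (fun m' y hy => h m' y (List.mem_cons_of_mem _ hy)) h1
      refine ⟨h3, ?_⟩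
      simp only [List.foldl_cons]
      rw [h4, h2]
-- inner sweep of top/bottom: independent writes along row r, reading fixed row r2 ≠ r
lemma pvInnerTB (r r2 : Nat) (hne : r2 ≠ r) :
    ∀ (n a : Nat) (v : Nat → Nat → Int),
      (List.range' a n).foldl (fun v c => pvUpd v r c (max (v r c) (v r2 c))) v
      = fun r' c' => if r' = r ∧ a ≤ c' ∧ c' < a + n then max (v r c') (v r2 c') else v r' c' := by
  intro n
  induction n with
  | zero =>
      intro a v
      funext r' c'
      simp only [List.range'_zero, List.foldl_nil]
      rw [if_neg (by omega)]
  | succ n ih =>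
      intro a v
      rw [List.range'_succ, List.foldl_cons, ih]
      funext r' c'
      have e1 : ∀ c'', c'' ≠ a → pvUpd v r a (max (v r a) (v r2 a)) r c'' = v r c'' := by
        intro c'' h
        unfold pvUpd
        rw [if_neg (fun q => h q.2)]
      have e2 : ∀ c'', pvUpd v r a (max (v r a) (v r2 a)) r2 c'' = v r2 c'' := by
        intro c''
        unfold pvUpd
        rw [if_neg (fun q => hne q.1)]
      by_cases hmain : r' = r ∧ a + 1 ≤ c' ∧ c' < a + 1 + n
      · rw [if_pos hmain, if_pos ⟨hmain.1, by omega, by omega⟩, e1 c' (by omega), e2]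
      · rw [if_neg hmain]
        by_cases hca : r' = r ∧ c' = a
        · rw [show pvUpd v r a (max (v r a) (v r2 a)) r' c' = max (v r a) (v r2 a) by
              unfold pvUpd; rw [if_pos ⟨hca.1, hca.2⟩]]
          rw [if_pos ⟨hca.1, by omega, by omega⟩, hca.2]
        · rw [show pvUpd v r a (max (v r a) (v r2 a)) r' c' = v r' c' by
              unfold pvUpd; rw [if_neg hca]]
          rw [if_neg (by
            rintro ⟨q1, q2, q3⟩
            have : c' ≠ a := fun h => hca ⟨q1, h⟩
            exact hmain ⟨q1, by omega, by omega⟩)]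

-- chained inner sweep of left: each write reads the cell written one step earlier
lemma pvInnerL (G : Nat → Nat → Int) (r : Nat) :
    ∀ (n a : Nat) (v : Nat → Nat → Int), 1 ≤ a →
      (∀ c', v r c' = if 1 ≤ c' ∧ c' < a then pvMax1 (fun j => G r j) c' else G r c') →
      (List.range' a n).foldl (fun v c => pvUpd v r c (max (v r c) (v r (c - 1)))) v
      = fun r' c' => if r' = r then (if 1 ≤ c' ∧ c' < a + n then pvMax1 (fun j => G r j) c' else G r c')
          else v r' c' := by
  intro n
  induction n with
  | zero =>
      intro a v ha hv
      funext r' c'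
      simp only [List.range'_zero, List.foldl_nil, Nat.add_zero]
      by_cases h : r' = r
      · subst h; rw [if_pos rfl]; exact hv c'
      · rw [if_neg h]
  | succ n ih =>
      intro a v ha hv
      rw [List.range'_succ, List.foldl_cons]
      have hval : max (v r a) (v r (a - 1)) = pvMax1 (fun j => G r j) a := by
        rw [hv a, hv (a - 1), if_neg (by omega)]
        obtain ⟨b, hb⟩ : ∃ b, a = b + 1 := ⟨a - 1, by omega⟩
        subst hb
        rw [show b + 1 - 1 = b from by omega]
        by_cases hb1 : 1 ≤ b
        · rw [if_pos ⟨hb1, by omega⟩]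
          exact pvMax1_succ_comm (fun j => G r j) b
        · rw [if_neg (by omega), show b = 0 from by omega]
          exact pvMax1_succ_comm (fun j => G r j) 0
      have hv1 : ∀ c', pvUpd v r a (max (v r a) (v r (a - 1))) r c'
          = if 1 ≤ c' ∧ c' < a + 1 then pvMax1 (fun j => G r j) c' else G r c' := by
        intro c'
        unfold pvUpd
        by_cases h2 : c' = a
        · subst h2
          rw [if_pos ⟨rfl, rfl⟩, if_pos ⟨by omega, by omega⟩, hval]
        · rw [if_neg (fun q => h2 q.2), hv c']
          by_cases h3 : 1 ≤ c' ∧ c' < a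
          · rw [if_pos h3, if_pos ⟨h3.1, by omega⟩]
          · rw [if_neg h3, if_neg (by rintro ⟨q1, q2⟩; exact h3 ⟨q1, by omega⟩)]
      rw [ih (a + 1) _ (by omega) hv1]
      funext r' c'
      by_cases h : r' = r
      · subst h
        rw [if_pos rfl, if_pos rfl, show a + 1 + n = a + (n + 1) from by omega]
      · rw [if_neg h, if_neg h, show pvUpd v r a (max (v r a) (v r (a - 1))) r' c' = v r' c' by
          unfold pvUpd; rw [if_neg (fun q => h q.1)]]

-- chained inner sweep of right: descending columns, each write reads the cell written before
lemma pvInnerR (G : Nat → Nat → Int) (C r : Nat) :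
    ∀ (n a : Nat) (v : Nat → Nat → Int), n ≤ C - 1 - a →
      (∀ c', v r c' = if a + n ≤ c' ∧ c' < C - 1 then pvMax1R (fun j => G r j) (C - 1) c' else G r c') →
      ((List.range' a n).reverse).foldl (fun v c => pvUpd v r c (max (v r c) (v r (c + 1)))) v
      = fun r' c' => if r' = r then (if a ≤ c' ∧ c' < C - 1 then pvMax1R (fun j => G r j) (C - 1) c' else G r c')
          else v r' c' := by
  intro n
  induction n with
  | zero =>
      intro a v hn hv
      funext r' c'
      simp only [List.range'_zero, List.reverse_nil, List.foldl_nil]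
      by_cases h : r' = r
      · subst h
        rw [hv c', if_pos rfl]
        by_cases h2 : a ≤ c' ∧ c' < C - 1
        · rw [if_pos ⟨by omega, h2.2⟩, if_pos h2]
        · rw [if_neg (by rintro ⟨q1, q2⟩; exact h2 ⟨by omega, q2⟩), if_neg h2]
      · rw [if_neg h]
  | succ n ih =>
      intro a v hn hv
      rw [List.range'_1_concat, List.reverse_append, List.reverse_singleton, List.singleton_append,
        List.foldl_cons]
      have hval : max (v r (a + n)) (v r (a + n + 1)) = pvMax1R (fun j => G r j) (C - 1) (a + n) := by
        rw [hv (a + n), hv (a + n + 1), if_neg (by omega)]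
        by_cases h2 : a + n + 1 < C - 1
        · rw [if_pos ⟨by omega, h2⟩]
          rw [pvMax1R_step (fun j => G r j) (C - 1) (a + n) (by omega)]
        · rw [if_neg (by omega), show a + n + 1 = C - 1 from by omega]
          rw [pvMax1R_step (fun j => G r j) (C - 1) (a + n) (by omega),
            show a + n + 1 = C - 1 from by omega, pvMax1R_top]
      have hv1 : ∀ c', pvUpd v r (a + n) (max (v r (a + n)) (v r (a + n + 1))) r c'
          = if a + n ≤ c' ∧ c' < C - 1 then pvMax1R (fun j => G r j) (C - 1) c' else G r c' := by
        intro c'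
        unfold pvUpd
        by_cases h2 : c' = a + n
        · subst h2
          rw [if_pos ⟨rfl, rfl⟩, if_pos ⟨le_rfl, by omega⟩, hval]
        · rw [if_neg (fun q => h2 q.2), hv c']
          split_ifs with h3 h4 <;> first | rfl | omega
      rw [ih a _ (by omega) hv1]
      funext r' c'
      by_cases h : r' = r
      · rw [if_pos h, if_pos h]
      · rw [if_neg h, if_neg h, show pvUpd v r (a + n) (max (v r (a + n)) (v r (a + n + 1))) r' c' = v r' c' by
          unfold pvUpd; rw [if_neg (fun q => h q.1)]]
-- outer sweep of top: rows processed upward, each row reading the row finished just before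
lemma pvOuterT (G : Nat → Nat → Int) (C : Nat) :
    ∀ (n a : Nat) (v : Nat → Nat → Int), 1 ≤ a →
      (∀ r' c', v r' c' = if 1 ≤ r' ∧ r' < a ∧ 1 ≤ c' ∧ c' < C - 1 then pvMax1 (fun i => G i c') r' else G r' c') →
      (List.range' a n).foldl (fun v r =>
        (List.range' 1 (C - 2)).foldl (fun v c => pvUpd v r c (max (v r c) (v (r - 1) c))) v) v
      = fun r' c' => if 1 ≤ r' ∧ r' < a + n ∧ 1 ≤ c' ∧ c' < C - 1 then pvMax1 (fun i => G i c') r' else G r' c' := by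
  intro n
  induction n with
  | zero =>
      intro a v ha hv
      funext r' c'
      simp only [List.range'_zero, List.foldl_nil]
      rw [hv r' c']
      split_ifs <;> first | rfl | omega
  | succ n ih =>
      intro a v ha hv
      rw [List.range'_succ, List.foldl_cons]
      rw [pvInnerTB a (a - 1) (by omega) (C - 2) 1 v]
      have hv1 : ∀ r' c',
          (fun r' c' => if r' = a ∧ 1 ≤ c' ∧ c' < 1 + (C - 2) then max (v a c') (v (a - 1) c') else v r' c') r' c'
          = if 1 ≤ r' ∧ r' < a + 1 ∧ 1 ≤ c' ∧ c' < C - 1 then pvMax1 (fun i => G i c') r' else G r' c' := by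
        intro r' c'
        beta_reduce
        by_cases hm : r' = a ∧ 1 ≤ c' ∧ c' < 1 + (C - 2)
        · rw [if_pos hm, if_pos ⟨by omega, by omega, by omega, by omega⟩]
          have hva : v a c' = G a c' := by rw [hv a c', if_neg (by omega)]
          have hvprev : v (a - 1) c' = pvMax1 (fun i => G i c') (a - 1) := by
            rw [hv (a - 1) c']
            by_cases ha2 : 2 ≤ a
            · rw [if_pos ⟨by omega, by omega, by omega, by omega⟩]
            · rw [if_neg (by omega), show a - 1 = 0 from by omega]; rfl
          rw [hva, hvprev, hm.1]
          obtain ⟨b, hb⟩ : ∃ b, a = b + 1 := ⟨a - 1, by omega⟩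
          subst hb
          rw [show b + 1 - 1 = b from by omega]
          exact pvMax1_succ_comm (fun i => G i c') b
        · rw [if_neg hm, hv r' c']
          split_ifs <;> first | rfl | omega
      rw [ih (a + 1) _ (by omega) hv1]
      funext r' c'
      split_ifs <;> first | rfl | omega

-- outer sweep of bottom: rows processed downward, each row reading the row finished just before
lemma pvOuterB (G : Nat → Nat → Int) (R C : Nat) :
    ∀ (n a : Nat) (v : Nat → Nat → Int), n ≤ R - 1 - a →
      (∀ r' c', v r' c' = if a + n ≤ r' ∧ r' < R - 1 ∧ 1 ≤ c' ∧ c' < C - 1 then pvMax1R (fun i => G i c') (R - 1) r' else G r' c') →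
      ((List.range' a n).reverse).foldl (fun v r =>
        (List.range' 1 (C - 2)).foldl (fun v c => pvUpd v r c (max (v r c) (v (r + 1) c))) v) v
      = fun r' c' => if a ≤ r' ∧ r' < R - 1 ∧ 1 ≤ c' ∧ c' < C - 1 then pvMax1R (fun i => G i c') (R - 1) r' else G r' c' := by
  intro n
  induction n with
  | zero =>
      intro a v hn hv
      funext r' c'
      simp only [List.range'_zero, List.reverse_nil, List.foldl_nil]
      rw [hv r' c']
      split_ifs <;> first | rfl | omega
  | succ n ih =>
      intro a v hn hv
      rw [List.range'_1_concat, List.reverse_append, List.reverse_singleton, List.singleton_append,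
        List.foldl_cons]
      rw [pvInnerTB (a + n) (a + n + 1) (by omega) (C - 2) 1 v]
      have hv1 : ∀ r' c',
          (fun r' c' => if r' = a + n ∧ 1 ≤ c' ∧ c' < 1 + (C - 2) then max (v (a + n) c') (v (a + n + 1) c') else v r' c') r' c'
          = if a + n ≤ r' ∧ r' < R - 1 ∧ 1 ≤ c' ∧ c' < C - 1 then pvMax1R (fun i => G i c') (R - 1) r' else G r' c' := by
        intro r' c'
        beta_reduce
        by_cases hm : r' = a + n ∧ 1 ≤ c' ∧ c' < 1 + (C - 2)
        · rw [if_pos hm, if_pos ⟨by omega, by omega, by omega, by omega⟩]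
          have hva : v (a + n) c' = G (a + n) c' := by rw [hv (a + n) c', if_neg (by omega)]
          have hvnext : v (a + n + 1) c' = pvMax1R (fun i => G i c') (R - 1) (a + n + 1) := by
            rw [hv (a + n + 1) c']
            by_cases h2 : a + n + 1 < R - 1
            · rw [if_pos ⟨by omega, h2, by omega, by omega⟩]
            · rw [if_neg (by omega), show a + n + 1 = R - 1 from by omega, pvMax1R_top]
          rw [hva, hvnext, hm.1, pvMax1R_step (fun i => G i c') (R - 1) (a + n) (by omega)]
        · rw [if_neg hm, hv r' c']
          split_ifs <;> first | rfl | omega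
      rw [ih a _ (by omega) hv1]

-- outer sweep of left: rows are independent, each filled by the chained left-to-right scan
lemma pvOuterL (G : Nat → Nat → Int) (C : Nat) :
    ∀ (n a : Nat) (v : Nat → Nat → Int), 1 ≤ a →
      (∀ r' c', v r' c' = if 1 ≤ r' ∧ r' < a ∧ 1 ≤ c' ∧ c' < C - 1 then pvMax1 (fun j => G r' j) c' else G r' c') →
      (List.range' a n).foldl (fun v r =>
        (List.range' 1 (C - 2)).foldl (fun v c => pvUpd v r c (max (v r c) (v r (c - 1)))) v) v
      = fun r' c' => if 1 ≤ r' ∧ r' < a + n ∧ 1 ≤ c' ∧ c' < C - 1 then pvMax1 (fun j => G r' j) c' else G r' c' := by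
  intro n
  induction n with
  | zero =>
      intro a v ha hv
      funext r' c'
      simp only [List.range'_zero, List.foldl_nil]
      rw [hv r' c']
      split_ifs <;> first | rfl | omega
  | succ n ih =>
      intro a v ha hv
      rw [List.range'_succ, List.foldl_cons]
      rw [pvInnerL G a (C - 2) 1 v le_rfl
        (fun c' => by rw [hv a c', if_neg (by omega), if_neg (by omega)])]
      have hv1 : ∀ r' c',
          (fun r' c' => if r' = a then (if 1 ≤ c' ∧ c' < 1 + (C - 2) then pvMax1 (fun j => G a j) c' else G a c') else v r' c') r' c'
          = if 1 ≤ r' ∧ r' < a + 1 ∧ 1 ≤ c' ∧ c' < C - 1 then pvMax1 (fun j => G r' j) c' else G r' c' := by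
        intro r' c'
        beta_reduce
        by_cases hm : r' = a
        · rw [if_pos hm, hm]
          split_ifs <;> first | rfl | omega
        · rw [if_neg hm, hv r' c']
          split_ifs <;> first | rfl | omega
      rw [ih (a + 1) _ (by omega) hv1]
      funext r' c'
      split_ifs <;> first | rfl | omega

-- outer sweep of right: rows are independent, each filled by the chained right-to-left scan
lemma pvOuterR (G : Nat → Nat → Int) (C : Nat) :
    ∀ (n a : Nat) (v : Nat → Nat → Int), 1 ≤ a →
      (∀ r' c', v r' c' = if 1 ≤ r' ∧ r' < a ∧ 1 ≤ c' ∧ c' < C - 1 then pvMax1R (fun j => G r' j) (C - 1) c' else G r' c') →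
      (List.range' a n).foldl (fun v r =>
        ((List.range' 1 (C - 2)).reverse).foldl (fun v c => pvUpd v r c (max (v r c) (v r (c + 1)))) v) v
      = fun r' c' => if 1 ≤ r' ∧ r' < a + n ∧ 1 ≤ c' ∧ c' < C - 1 then pvMax1R (fun j => G r' j) (C - 1) c' else G r' c' := by
  intro n
  induction n with
  | zero =>
      intro a v ha hv
      funext r' c'
      simp only [List.range'_zero, List.foldl_nil]
      rw [hv r' c']
      split_ifs <;> first | rfl | omega
  | succ n ih =>
      intro a v ha hv
      rw [List.range'_succ, List.foldl_cons]
      rw [pvInnerR G C a (C - 2) 1 v (by omega)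
        (fun c' => by rw [hv a c', if_neg (by omega), if_neg (by omega)])]
      have hv1 : ∀ r' c',
          (fun r' c' => if r' = a then (if 1 ≤ c' ∧ c' < C - 1 then pvMax1R (fun j => G a j) (C - 1) c' else G a c') else v r' c') r' c'
          = if 1 ≤ r' ∧ r' < a + 1 ∧ 1 ≤ c' ∧ c' < C - 1 then pvMax1R (fun j => G r' j) (C - 1) c' else G r' c' := by
        intro r' c'
        beta_reduce
        by_cases hm : r' = a
        · rw [if_pos hm, hm]
          split_ifs <;> first | rfl | omega
        · rw [if_neg hm, hv r' c']
          split_ifs <;> first | rfl | omega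
      rw [ih (a + 1) _ (by omega) hv1]
      funext r' c'
      split_ifs <;> first | rfl | omega

lemma pvMax1R_congr (H H' : Nat → Int) (K c : Nat) (h : ∀ i, i ≤ K → H i = H' i) :
    pvMax1R H K c = pvMax1R H' K c :=
  pvMax1_congr _ _ _ (fun i _ => h _ (by omega))

lemma pvShape_ext (m m' : List (List Int)) (R C : Nat) (h : pvShape m R C) (h' : pvShape m' R C)
    (hp : ∀ r, r < R → ∀ c, c < C → pvCell m r c = pvCell m' r c) : m = m' := by
  obtain ⟨hl, hr⟩ := h
  obtain ⟨hl', hr'⟩ := h'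
  apply List.ext_getElem (by omega)
  intro i h1 h2
  have hiR : i < R := by omega
  have l1 : m[i].length = C := hr _ (List.getElem_mem h1)
  have l2 : m'[i].length = C := hr' _ (List.getElem_mem h2)
  apply List.ext_getElem (by omega)
  intro j j1 j2
  have hjC : j < C := by omega
  have e1 : pvCell m i j = m[i][j] := by
    unfold pvCell
    rw [List.getD_eq_getElem _ _ h1, List.getD_eq_getElem _ _ (by omega)]
  have e2 : pvCell m' i j = m'[i][j] := by
    unfold pvCell
    rw [List.getD_eq_getElem _ _ h2, List.getD_eq_getElem _ _ (by omega)]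
  rw [← e1, ← e2]
  exact hp i hiR j hjC
-- matrix-level characterisation of A's four sweeps
lemma pvTopChar (g0 : List (List Int)) (R C : Nat) (h0 : pvShape g0 R C) :
    pvShape ((List.range' 1 (R - 2)).foldl (fun M row =>
        (List.range' 1 (C - 2)).foldl (fun M col =>
          pvSet2 M row col (max (pvCell M row col) (pvCell M (row - 1) col))) M) g0) R C
    ∧ pvCell ((List.range' 1 (R - 2)).foldl (fun M row =>
        (List.range' 1 (C - 2)).foldl (fun M col =>
          pvSet2 M row col (max (pvCell M row col) (pvCell M (row - 1) col))) M) g0)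
      = fun r' c' => if 1 ≤ r' ∧ r' < R - 1 ∧ 1 ≤ c' ∧ c' < C - 1
          then pvMax1 (fun i => pvCell g0 i c') r' else pvCell g0 r' c' := by
  obtain ⟨hs, hcell⟩ := pvFoldl_sim R C
    (fun M row => (List.range' 1 (C - 2)).foldl (fun M col =>
      pvSet2 M row col (max (pvCell M row col) (pvCell M (row - 1) col))) M)
    (fun v row => (List.range' 1 (C - 2)).foldl (fun v col =>
      pvUpd v row col (max (v row col) (v (row - 1) col))) v)
    (List.range' 1 (R - 2)) g0
    (by
      intro m' x hx hm'
      have hxR : x < R := by have := List.mem_range'_1.mp hx; omega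
      refine pvFoldl_sim R C _ _ (List.range' 1 (C - 2)) m' ?_ hm'
      intro m'' c hc hm''
      have hcC : c < C := by have := List.mem_range'_1.mp hc; omega
      exact ⟨pvShape_set2 m'' R C x c _ hm'' hxR, pvCell_set2 m'' R C x c _ hm'' hxR hcC⟩) h0
  refine ⟨hs, ?_⟩
  rw [hcell, pvOuterT (pvCell g0) C (R - 2) 1 (pvCell g0) le_rfl
    (fun r' c' => by rw [if_neg (by omega)])]
  funext r' c'
  split_ifs <;> first | rfl | omega

lemma pvBottomChar (g0 : List (List Int)) (R C : Nat) (h0 : pvShape g0 R C) :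
    pvShape (((List.range' 1 (R - 2)).reverse).foldl (fun M row =>
        (List.range' 1 (C - 2)).foldl (fun M col =>
          pvSet2 M row col (max (pvCell M row col) (pvCell M (row + 1) col))) M) g0) R C
    ∧ pvCell (((List.range' 1 (R - 2)).reverse).foldl (fun M row =>
        (List.range' 1 (C - 2)).foldl (fun M col =>
          pvSet2 M row col (max (pvCell M row col) (pvCell M (row + 1) col))) M) g0)
      = fun r' c' => if 1 ≤ r' ∧ r' < R - 1 ∧ 1 ≤ c' ∧ c' < C - 1
          then pvMax1R (fun i => pvCell g0 i c') (R - 1) r' else pvCell g0 r' c' := by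
  obtain ⟨hs, hcell⟩ := pvFoldl_sim R C
    (fun M row => (List.range' 1 (C - 2)).foldl (fun M col =>
      pvSet2 M row col (max (pvCell M row col) (pvCell M (row + 1) col))) M)
    (fun v row => (List.range' 1 (C - 2)).foldl (fun v col =>
      pvUpd v row col (max (v row col) (v (row + 1) col))) v)
    ((List.range' 1 (R - 2)).reverse) g0
    (by
      intro m' x hx hm'
      have hxR : x < R := by
        have := List.mem_range'_1.mp (List.mem_reverse.mp hx); omega
      refine pvFoldl_sim R C _ _ (List.range' 1 (C - 2)) m' ?_ hm'
      intro m'' c hc hm''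
      have hcC : c < C := by have := List.mem_range'_1.mp hc; omega
      exact ⟨pvShape_set2 m'' R C x c _ hm'' hxR, pvCell_set2 m'' R C x c _ hm'' hxR hcC⟩) h0
  refine ⟨hs, ?_⟩
  rw [hcell, pvOuterB (pvCell g0) R C (R - 2) 1 (pvCell g0) (by omega)
    (fun r' c' => by rw [if_neg (by omega)])]

lemma pvLeftChar (g0 : List (List Int)) (R C : Nat) (h0 : pvShape g0 R C) :
    pvShape ((List.range' 1 (R - 2)).foldl (fun M row =>
        (List.range' 1 (C - 2)).foldl (fun M col =>
          pvSet2 M row col (max (pvCell M row col) (pvCell M row (col - 1)))) M) g0) R C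
    ∧ pvCell ((List.range' 1 (R - 2)).foldl (fun M row =>
        (List.range' 1 (C - 2)).foldl (fun M col =>
          pvSet2 M row col (max (pvCell M row col) (pvCell M row (col - 1)))) M) g0)
      = fun r' c' => if 1 ≤ r' ∧ r' < R - 1 ∧ 1 ≤ c' ∧ c' < C - 1
          then pvMax1 (fun j => pvCell g0 r' j) c' else pvCell g0 r' c' := by
  obtain ⟨hs, hcell⟩ := pvFoldl_sim R C
    (fun M row => (List.range' 1 (C - 2)).foldl (fun M col =>
      pvSet2 M row col (max (pvCell M row col) (pvCell M row (col - 1)))) M)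
    (fun v row => (List.range' 1 (C - 2)).foldl (fun v col =>
      pvUpd v row col (max (v row col) (v row (col - 1)))) v)
    (List.range' 1 (R - 2)) g0
    (by
      intro m' x hx hm'
      have hxR : x < R := by have := List.mem_range'_1.mp hx; omega
      refine pvFoldl_sim R C _ _ (List.range' 1 (C - 2)) m' ?_ hm'
      intro m'' c hc hm''
      have hcC : c < C := by have := List.mem_range'_1.mp hc; omega
      exact ⟨pvShape_set2 m'' R C x c _ hm'' hxR, pvCell_set2 m'' R C x c _ hm'' hxR hcC⟩) h0
  refine ⟨hs, ?_⟩
  rw [hcell, pvOuterL (pvCell g0) C (R - 2) 1 (pvCell g0) le_rfl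
    (fun r' c' => by rw [if_neg (by omega)])]
  funext r' c'
  split_ifs <;> first | rfl | omega

lemma pvRightChar (g0 : List (List Int)) (R C : Nat) (h0 : pvShape g0 R C) :
    pvShape ((List.range' 1 (R - 2)).foldl (fun M row =>
        ((List.range' 1 (C - 2)).reverse).foldl (fun M col =>
          pvSet2 M row col (max (pvCell M row col) (pvCell M row (col + 1)))) M) g0) R C
    ∧ pvCell ((List.range' 1 (R - 2)).foldl (fun M row =>
        ((List.range' 1 (C - 2)).reverse).foldl (fun M col =>
          pvSet2 M row col (max (pvCell M row col) (pvCell M row (col + 1)))) M) g0)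
      = fun r' c' => if 1 ≤ r' ∧ r' < R - 1 ∧ 1 ≤ c' ∧ c' < C - 1
          then pvMax1R (fun j => pvCell g0 r' j) (C - 1) c' else pvCell g0 r' c' := by
  obtain ⟨hs, hcell⟩ := pvFoldl_sim R C
    (fun M row => ((List.range' 1 (C - 2)).reverse).foldl (fun M col =>
      pvSet2 M row col (max (pvCell M row col) (pvCell M row (col + 1)))) M)
    (fun v row => ((List.range' 1 (C - 2)).reverse).foldl (fun v col =>
      pvUpd v row col (max (v row col) (v row (col + 1)))) v)
    (List.range' 1 (R - 2)) g0
    (by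
      intro m' x hx hm'
      have hxR : x < R := by have := List.mem_range'_1.mp hx; omega
      refine pvFoldl_sim R C _ _ ((List.range' 1 (C - 2)).reverse) m' ?_ hm'
      intro m'' c hc hm''
      have hcC : c < C := by
        have := List.mem_range'_1.mp (List.mem_reverse.mp hc); omega
      exact ⟨pvShape_set2 m'' R C x c _ hm'' hxR, pvCell_set2 m'' R C x c _ hm'' hxR hcC⟩) h0
  refine ⟨hs, ?_⟩
  rw [hcell, pvOuterR (pvCell g0) C (R - 2) 1 (pvCell g0) le_rfl
    (fun r' c' => by rw [if_neg (by omega)])]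
  funext r' c'
  split_ifs <;> first | rfl | omega
-- B-side: max() over the slice of original values, related to pvMax1 / pvMax1R
lemma pvMaxNE_append (l : List Int) (hl : l ≠ []) (a : Int) :
    pvMaxNE (l ++ [a]) = max (pvMaxNE l) a := by
  cases l with
  | nil => exact absurd rfl hl
  | cons x xs => simp [pvMaxNE, List.foldl_append]

lemma pvFoldlMax_max : ∀ (ys : List Int) (x y : Int), ys.foldl max (max x y) = max x (ys.foldl max y) := by
  intro ys
  induction ys with
  | nil => intro x y; rfl
  | cons z zs ih =>
      intro x y
      simp only [List.foldl_cons]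
      rw [max_assoc, ih]

lemma pvMaxNE_cons (x y : Int) (xs : List Int) :
    pvMaxNE (x :: y :: xs) = max x (pvMaxNE (y :: xs)) := by
  show (y :: xs).foldl max x = _
  simp only [List.foldl_cons]
  rw [show List.foldl max (max x y) xs = max x (List.foldl max y xs) from pvFoldlMax_max xs x y]
  rfl

lemma pvMaxNE_range (H : Nat → Int) : ∀ r, pvMaxNE ((List.range (r + 1)).map H) = pvMax1 H r := by
  intro r
  induction r with
  | zero => rfl
  | succ r ih =>
      rw [List.range_succ, List.map_append, List.map_singleton,
        pvMaxNE_append _ (by simp) _, ih]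
      rfl

lemma pvMaxNE_range' (H : Nat → Int) : ∀ n c, pvMaxNE ((List.range' c (n + 1)).map H) = pvMax1R H (c + n) c := by
  intro n
  induction n with
  | zero =>
      intro c
      rw [show List.range' c 1 = [c] from rfl]
      show H c = _
      rw [show c + 0 = c from rfl, pvMax1R_top]
  | succ n ih =>
      intro c
      rw [List.range'_succ, List.map_cons]
      have hne : List.range' (c + 1) (n + 1) = (c + 1) :: List.range' (c + 2) n := by
        rw [List.range'_succ]
      rw [show (List.range' (c + 1) (n + 1)).map H = H (c + 1) :: (List.range' (c + 2) n).map H from by rw [hne]; rfl]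
      rw [pvMaxNE_cons, show H (c + 1) :: (List.range' (c + 2) n).map H = (List.range' (c + 1) (n + 1)).map H from by rw [hne]; rfl]
      rw [ih (c + 1), pvMax1R_step H (c + (n + 1)) c (by omega),
        show c + 1 + n = c + (n + 1) from by omega]
lemma pvMapRange_take (H : Nat → Int) (n m : Nat) (h : m ≤ n) :
    ((List.range n).map H).take m = (List.range m).map H := by
  rw [← List.map_take, List.take_range, Nat.min_eq_left h]

lemma pvMapRange_drop (H : Nat → Int) (n m : Nat) :
    ((List.range n).map H).drop m = (List.range' m (n - m)).map H := by
  rw [← List.map_drop, List.range_eq_range', List.drop_range']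
  simp

-- ===== VERDICT (by name: the statement is the Claim_ definition above) =====
theorem get_max_heights_maps_spec : Claim_equal_get_max_heights_maps := by
  intro hm _ hpre
  obtain ⟨hne, hrows⟩ := hpre
  unfold Spec_get_max_heights_maps get_max_heights_maps get_max_heights_maps_alt
  dsimp only
  set R := hm.length with hR
  set C := (hm.getD 0 []).length with hC
  set g0 := pvCopy hm R C with hg0
  have hshape : pvShape g0 R C := by
    rw [hg0]; unfold pvCopy; exact pvShape_mk (fun r c => pvCell hm r c) R C
  have hcopy : ∀ r c, r < R → c < C → pvCell g0 r c = pvCell hm r c := by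
    intro r c hr hc
    rw [hg0]; unfold pvCopy; exact pvCell_mk (fun r c => pvCell hm r c) R C r c hr hc
  -- B's truncated grid copy, row by row
  have hrowEq : ∀ r, r < R →
      (hm.map (fun row => row.take C)).getD r [] = (List.range C).map (fun j => pvCell hm r j) := by
    intro r hr
    have hr' : r < hm.length := by omega
    have hlen : C ≤ hm[r].length := hrows _ (List.getElem_mem hr')
    rw [List.getD_eq_getElem?_getD, List.getElem?_map, List.getElem?_eq_getElem hr',
      Option.map_some, Option.getD_some]
    apply List.ext_getElem (by simp; omega)
    intro j hj1 hj2
    have hjC : j < C := by simp at hj2; omega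
    rw [List.getElem_take, List.getElem_map, List.getElem_range]
    unfold pvCell
    rw [List.getD_eq_getElem _ _ hr', List.getD_eq_getElem _ _ (by omega)]
  have hgridCell : ∀ r c, r < R → c < C →
      pvCell (hm.map (fun row => row.take C)) r c = pvCell hm r c := by
    intro r c hr hc
    unfold pvCell
    rw [hrowEq r hr]
    rw [List.getD_eq_getElem?_getD, List.getElem?_map, List.getElem?_range hc,
      Option.map_some, Option.getD_some]
    rfl
  -- B's columns[c]
  have hcolEq : ∀ c, c < C →
      (((List.range C).map (fun c => (List.range R).map (fun r =>
          pvCell (hm.map (fun row => row.take C)) r c))).getD c [])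
        = (List.range R).map (fun i => pvCell hm i c) := by
    intro c hc
    rw [List.getD_eq_getElem?_getD, List.getElem?_map, List.getElem?_range hc,
      Option.map_some, Option.getD_some]
    apply List.ext_getElem (by simp)
    intro i h1 h2
    have hiR : i < R := by simpa using h1
    simp only [List.getElem_map, List.getElem_range]
    exact hgridCell i c hiR hc
  refine congrArg₂ Prod.mk ?_ (congrArg₂ Prod.mk ?_ (congrArg₂ Prod.mk ?_ ?_))
  · -- top
    refine pvShape_ext _ _ R C (pvTopChar g0 R C hshape).1 (pvShape_mk _ R C) ?_
    intro r hr c hc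
    rw [(pvTopChar g0 R C hshape).2, pvCell_mk _ R C r c hr hc]
    beta_reduce
    by_cases hint : 1 ≤ r ∧ r < R - 1 ∧ 1 ≤ c ∧ c < C - 1
    · rw [if_pos hint, if_pos (show 0 < r ∧ r < R - 1 ∧ 0 < c ∧ c < C - 1 from by omega),
        hcolEq c hc, pvMapRange_take (fun i => pvCell hm i c) R (r + 1) (by omega),
        pvMaxNE_range (fun i => pvCell hm i c) r]
      exact pvMax1_congr (fun i => pvCell g0 i c) (fun i => pvCell hm i c) r
        (fun i hi => hcopy i c (by omega) hc)
    · rw [if_neg hint, if_neg (show ¬(0 < r ∧ r < R - 1 ∧ 0 < c ∧ c < C - 1) from by omega),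
        hgridCell r c hr hc, hcopy r c hr hc]
  · -- bottom
    refine pvShape_ext _ _ R C (pvBottomChar g0 R C hshape).1 (pvShape_mk _ R C) ?_
    intro r hr c hc
    rw [(pvBottomChar g0 R C hshape).2, pvCell_mk _ R C r c hr hc]
    beta_reduce
    by_cases hint : 1 ≤ r ∧ r < R - 1 ∧ 1 ≤ c ∧ c < C - 1
    · rw [if_pos hint, if_pos (show 0 < r ∧ r < R - 1 ∧ 0 < c ∧ c < C - 1 from by omega),
        hcolEq c hc, pvMapRange_drop (fun i => pvCell hm i c) R r,
        show R - r = (R - 1 - r) + 1 from by omega,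
        pvMaxNE_range' (fun i => pvCell hm i c) (R - 1 - r) r,
        show r + (R - 1 - r) = R - 1 from by omega]
      exact pvMax1R_congr (fun i => pvCell g0 i c) (fun i => pvCell hm i c) (R - 1) r
        (fun i hi => hcopy i c (by omega) hc)
    · rw [if_neg hint, if_neg (show ¬(0 < r ∧ r < R - 1 ∧ 0 < c ∧ c < C - 1) from by omega),
        hgridCell r c hr hc, hcopy r c hr hc]
  · -- left
    refine pvShape_ext _ _ R C (pvLeftChar g0 R C hshape).1 (pvShape_mk _ R C) ?_
    intro r hr c hc
    rw [(pvLeftChar g0 R C hshape).2, pvCell_mk _ R C r c hr hc]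
    beta_reduce
    by_cases hint : 1 ≤ r ∧ r < R - 1 ∧ 1 ≤ c ∧ c < C - 1
    · rw [if_pos hint, if_pos (show 0 < r ∧ r < R - 1 ∧ 0 < c ∧ c < C - 1 from by omega),
        hrowEq r hr, pvMapRange_take (fun j => pvCell hm r j) C (c + 1) (by omega),
        pvMaxNE_range (fun j => pvCell hm r j) c]
      exact pvMax1_congr (fun j => pvCell g0 r j) (fun j => pvCell hm r j) c
        (fun i hi => hcopy r i hr (by omega))
    · rw [if_neg hint, if_neg (show ¬(0 < r ∧ r < R - 1 ∧ 0 < c ∧ c < C - 1) from by omega),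
        hgridCell r c hr hc, hcopy r c hr hc]
  · -- right
    refine pvShape_ext _ _ R C (pvRightChar g0 R C hshape).1 (pvShape_mk _ R C) ?_
    intro r hr c hc
    rw [(pvRightChar g0 R C hshape).2, pvCell_mk _ R C r c hr hc]
    beta_reduce
    by_cases hint : 1 ≤ r ∧ r < R - 1 ∧ 1 ≤ c ∧ c < C - 1
    · rw [if_pos hint, if_pos (show 0 < r ∧ r < R - 1 ∧ 0 < c ∧ c < C - 1 from by omega),
        hrowEq r hr, pvMapRange_drop (fun j => pvCell hm r j) C c,
        show C - c = (C - 1 - c) + 1 from by omega,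
        pvMaxNE_range' (fun j => pvCell hm r j) (C - 1 - c) c,
        show c + (C - 1 - c) = C - 1 from by omega]
      exact pvMax1R_congr (fun j => pvCell g0 r j) (fun j => pvCell hm r j) (C - 1) c
        (fun i hi => hcopy r i hr (by omega))
    · rw [if_neg hint, if_neg (show ¬(0 < r ∧ r < R - 1 ∧ 0 < c ∧ c < C - 1) from by omega),
        hgridCell r c hr hc, hcopy r c hr hc]
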